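-- pv_equiv track=rewrite | github.com/Mrxxxx-1/Sequence-Alignment | efficient_3.py | eff_bottom_up
-- ===== SOURCE A (Python) =====
-- gap = 30
--
-- mismatch = {"AA":0, "AC":110, "AG": 48, "AT":94, "CA":110, "CC":0, "CG":118, "CT":48,
--             "GA":48, "GC":118, "GG":0, "GT":110, "TA": 94, "TC":48, "TG":110, "TT":0}
--
-- def eff_bottom_up(str_1, str_2):
--     # Initialize the OPT matrix
--     m = len(str_1) + 1
--     n = len(str_2) + 1
--     OPT = [0 for _ in range(m)]
--
--     # Initialize first column
--     for i in range(m):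
--         OPT[i] = i * gap
--
--     # Bottom-up pass
--     for j in range(1, n):
--         temp_OPT = [0 for _ in range(m)]
--         temp_OPT[0] = j * gap
--         for i in range(1, m):
--             gap_1 = temp_OPT[i - 1] + gap
--             gap_2 = OPT[i] + gap
--             # Match/Mismatch
--             alpha = OPT[i - 1] + mismatch[str_1[i - 1]+str_2[j - 1]]
--             temp_OPT[i] = min(gap_1, gap_2, alpha)
--
--         OPT = temp_OPT
--
--     return OPT
-- ===== SOURCE B (Python) =====
-- gap = 30
--
-- mismatch = {"AA":0, "AC":110, "AG": 48, "AT":94, "CA":110, "CC":0, "CG":118, "CT":48,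
--             "GA":48, "GC":118, "GG":0, "GT":110, "TA": 94, "TC":48, "TG":110, "TT":0}
--
-- def eff_bottom_up(str_1, str_2):
--     # Anti-diagonal wavefront: sweep diagonals d = i + j, keeping only the two previous
--     # diagonals as dicts {i: cost}; cells of the last column (j == n-1) appear once each,
--     # in increasing i, so they are collected by appending as the wavefront passes them.
--     m = len(str_1) + 1
--     n = len(str_2) + 1
--     last_col = []
--     prev2 = {}
--     prev1 = {}
--     for d in range(m + n - 1):
--         cur = {}
--         for i in range(max(0, d - n + 1), min(d, m - 1) + 1):
--             j = d - i
--             if i == 0: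
--                 v = j * gap
--             elif j == 0:
--                 v = i * gap
--             else:
--                 v = min(prev1[i - 1] + gap, prev1[i] + gap,
--                         prev2[i - 1] + mismatch[str_1[i - 1] + str_2[j - 1]])
--             cur[i] = v
--             if j == n - 1:
--                 last_col.append(v)
--         prev2, prev1 = prev1, cur
--     return last_col
-- ===== Notes on version B (the rewrite author's own statement) =====
-- stated objective: alternative
-- what changed: B sweeps the edit grid along anti-diagonals d=i+j (a wavefront), keeping only the two previous diagonals as dicts keyed by row index and appending each last-column cell as the wavefront crosses it, instead of A's column-by-column rolling-array DP.
import Mathlib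
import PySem

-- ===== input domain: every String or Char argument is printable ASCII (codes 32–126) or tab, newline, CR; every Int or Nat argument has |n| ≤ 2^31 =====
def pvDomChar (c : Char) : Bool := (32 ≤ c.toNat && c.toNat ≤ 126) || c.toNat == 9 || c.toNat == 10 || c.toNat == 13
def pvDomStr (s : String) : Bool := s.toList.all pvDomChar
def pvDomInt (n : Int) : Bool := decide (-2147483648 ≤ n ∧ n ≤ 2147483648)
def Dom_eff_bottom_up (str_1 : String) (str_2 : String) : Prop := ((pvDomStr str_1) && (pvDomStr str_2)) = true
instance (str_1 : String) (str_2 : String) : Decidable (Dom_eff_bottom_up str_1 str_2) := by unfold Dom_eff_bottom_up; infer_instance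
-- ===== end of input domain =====

-- B sweeps the edit grid along anti-diagonals d = i + j (wavefront), keeping the two previous
-- diagonals as dicts and collecting the last column as the wavefront crosses it; A rolls one
-- column, column by column (objective: alternative).

-- module-level constants shared by both Pythons
def pvGap : Int := 30

def pvMismatch : PySem.Dict String Int := PySem.Dict.ofList
  [("AA",0), ("AC",110), ("AG",48), ("AT",94), ("CA",110), ("CC",0), ("CG",118), ("CT",48),
   ("GA",48), ("GC",118), ("GG",0), ("GT",110), ("TA",94), ("TC",48), ("TG",110), ("TT",0)]

-- mismatch[str_1[..]+str_2[..]]: under Pre_ the key is present; getD 0 is exact there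
-- (Python raises KeyError outside Pre_).
def pvMM (a b : Char) : Int := (PySem.Dict.get? pvMismatch (String.ofList [a, b])).getD 0

-- ===== PORT A =====
-- inner loop body of A (the `for i in range(1, m)` body); indices are in range on every call
-- the ports make, so List.getD is exact.
def pvStepA (s t : List Char) (OPT : List Int) (j : Nat) (temp : List Int) (k2 : Nat) : List Int :=
  let i := k2 + 1
  let gap_1 := temp.getD (i - 1) 0 + pvGap
  let gap_2 := OPT.getD i 0 + pvGap
  let alpha := OPT.getD (i - 1) 0 + pvMM (s.getD (i - 1) ' ') (t.getD (j - 1) ' ')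
  temp ++ [min (min gap_1 gap_2) alpha]

def eff_bottom_up (str_1 : String) (str_2 : String) : List Int :=
  let s := str_1.toList
  let t := str_2.toList
  let m := s.length + 1
  let n := t.length + 1
  let OPT0 := (List.range m).map (fun i : Nat => (i : Int) * pvGap)
  (List.range (n - 1)).foldl (fun OPT k =>
      (List.range (m - 1)).foldl (pvStepA s t OPT (k + 1)) [((k + 1 : Nat) : Int) * pvGap])
    OPT0

-- ===== PORT B =====
-- body of B's inner loop (`for i in range(max(0, d-n+1), min(d, m-1)+1)`); state = (cur, last_col).
-- prev1[i-1], prev1[i], prev2[i-1] are dict lookups whose keys are always present on the calls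
-- the port makes, so getD 0 is exact there.
def pvStepB (s t : List Char) (n : Int) (prev2 prev1 : PySem.Dict Int Int) (d : Int)
    (st : PySem.Dict Int Int × List Int) (i : Int) : PySem.Dict Int Int × List Int :=
  let j := d - i
  let v : Int :=
    if i = 0 then j * pvGap
    else if j = 0 then i * pvGap
    else
      min (min (prev1.getD (i - 1) 0 + pvGap) (prev1.getD i 0 + pvGap))
          (prev2.getD (i - 1) 0 +
            pvMM (PySem.List.pyGetD s (i - 1) ' ') (PySem.List.pyGetD t (j - 1) ' '))
  (st.1.insert i v, if j = n - 1 then st.2 ++ [v] else st.2)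

def eff_bottom_up_alt (str_1 : String) (str_2 : String) : List Int :=
  let s := str_1.toList
  let t := str_2.toList
  let m : Int := s.length + 1
  let n : Int := t.length + 1
  let fin := (PySem.List.pyRange 0 (m + n - 1) 1).foldl
    (fun (st : List Int × PySem.Dict Int Int × PySem.Dict Int Int) (d : Int) =>
      let inner := (PySem.List.pyRange (max 0 (d - n + 1)) (min d (m - 1) + 1) 1).foldl
        (pvStepB s t n st.2.1 st.2.2 d) (PySem.Dict.empty, st.1)
      (inner.2, st.2.2, inner.1))
    ([], PySem.Dict.empty, PySem.Dict.empty)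
  fin.1

-- ===== PRECONDITION & SPEC =====
-- Pre_ excludes exactly the inputs on which A raises KeyError: both strings nonempty and some
-- character outside "ACGT" (every character pair is looked up in mismatch).
def Pre_eff_bottom_up (str_1 : String) (str_2 : String) : Prop :=
  str_1.toList = [] ∨ str_2.toList = [] ∨
    ((str_1.toList.all (fun c => ['A','C','G','T'].contains c)) = true ∧
     (str_2.toList.all (fun c => ['A','C','G','T'].contains c)) = true)
instance (str_1 : String) (str_2 : String) : Decidable (Pre_eff_bottom_up str_1 str_2) := by
  unfold Pre_eff_bottom_up; infer_instance

def pvWitness_eff_bottom_up : String × String := ("AC", "GT")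

def Spec_eff_bottom_up (str_1 : String) (str_2 : String) (out : List Int) : Prop := out = eff_bottom_up_alt str_1 str_2
instance (str_1 : String) (str_2 : String) (out : List Int) : Decidable (Spec_eff_bottom_up str_1 str_2 out) := by unfold Spec_eff_bottom_up; infer_instance

-- ===== CLAIM (what is proved, stated in full; the proofs are below) =====
def Claim_equal_eff_bottom_up : Prop := ∀ (str_1 : String) (str_2 : String), Dom_eff_bottom_up str_1 str_2 → Pre_eff_bottom_up str_1 str_2 → Spec_eff_bottom_up str_1 str_2 (eff_bottom_up str_1 str_2)

-- ===== LEMMAS AND PROOFS =====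

-- the alignment-cost recurrence both programs compute
def pvDP (s t : List Char) : Nat → Nat → Int
  | i, 0 => (i : Int) * pvGap
  | 0, j + 1 => ((j : Nat) + 1 : Nat) * pvGap
  | i + 1, j + 1 =>
      min (min (pvDP s t i (j + 1) + pvGap) (pvDP s t (i + 1) j + pvGap))
          (pvDP s t i j + pvMM (s.getD i ' ') (t.getD j ' '))
  termination_by i j => i + j

lemma pvDP_zero_left (s t : List Char) (j : Nat) : pvDP s t 0 j = (j : Int) * pvGap := by
  cases j <;> simp [pvDP]

lemma pvDP_zero_right (s t : List Char) (i : Nat) : pvDP s t i 0 = (i : Int) * pvGap := by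
  cases i <;> simp [pvDP]

-- A's inner loop produces the first K+1 entries of column j+1 from column j
lemma pvInnerA (s t : List Char) (j : Nat) :
    ∀ K, K ≤ s.length →
      (List.range K).foldl
          (pvStepA s t ((List.range (s.length + 1)).map (fun i => pvDP s t i j)) (j + 1))
          [((j + 1 : Nat) : Int) * pvGap]
        = (List.range (K + 1)).map (fun i => pvDP s t i (j + 1)) := by
  intro K
  induction K with
  | zero =>
      intro _
      simp [pvDP_zero_left]
  | succ K ih =>
      intro hK
      rw [List.range_succ (n := K), List.foldl_append, ih (by omega)]
      simp only [List.foldl_cons, List.foldl_nil, pvStepA]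
      rw [List.range_succ (n := K + 1), List.map_append]
      congr 1
      simp only [Nat.add_sub_cancel]
      rw [PySem.List.getD_map_range _ _ _ _ (by omega),
          PySem.List.getD_map_range _ _ _ _ (by omega),
          PySem.List.getD_map_range _ _ _ _ (by omega)]
      simp [pvDP]

-- A's outer loop: after J columns the rolling column is column J
lemma pvOuterA (s t : List Char) :
    ∀ J, J ≤ t.length →
      (List.range J).foldl (fun OPT k =>
          (List.range s.length).foldl (pvStepA s t OPT (k + 1)) [((k + 1 : Nat) : Int) * pvGap])
        ((List.range (s.length + 1)).map (fun i : Nat => (i : Int) * pvGap))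
        = (List.range (s.length + 1)).map (fun i => pvDP s t i J) := by
  intro J
  induction J with
  | zero =>
      intro _
      simp only [List.range_zero, List.foldl_nil]
      exact List.map_congr_left (fun i _ => (pvDP_zero_right s t i).symm)
  | succ J ih =>
      intro hJ
      rw [List.range_succ (n := J), List.foldl_append, ih (by omega)]
      simp only [List.foldl_cons, List.foldl_nil]
      exact pvInnerA s t J s.length (le_refl _)

-- B's inner loop: the wavefront over one anti-diagonal d, cells i = d-N .. d-N+K-1
lemma pvInnerB (s t : List Char) (d : Nat) (p2 p1 : PySem.Dict Int Int) (L : List Int)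
    (h1 : ∀ i : Nat, d - 1 - t.length ≤ i → i ≤ d - 1 → i ≤ s.length →
          p1.getD (i : Int) 0 = pvDP s t i (d - 1 - i))
    (h2 : ∀ i : Nat, d - 2 - t.length ≤ i → i ≤ d - 2 → i ≤ s.length →
          p2.getD (i : Int) 0 = pvDP s t i (d - 2 - i)) :
    ∀ K : Nat, d - t.length + K ≤ min d s.length + 1 →
    ∃ cur : PySem.Dict Int Int,
      (PySem.List.pyRange ((d - t.length : Nat) : Int) (((d - t.length : Nat) : Int) + (K : Int)) 1).foldl
          (pvStepB s t ((t.length : Int) + 1) p2 p1 (d : Int)) (PySem.Dict.empty, L)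
        = (cur, L ++ (if t.length ≤ d ∧ 1 ≤ K then [pvDP s t (d - t.length) t.length] else []))
      ∧ ∀ i : Nat, d - t.length ≤ i → i < d - t.length + K →
          cur.getD (i : Int) 0 = pvDP s t i (d - i) := by
  intro K
  induction K with
  | zero =>
      intro _
      refine ⟨PySem.Dict.empty, ?_, ?_⟩
      · rw [if_neg (by omega)]
        have : (((d - t.length : Nat) : Int) + ((0 : Nat) : Int)) = ((d - t.length : Nat) : Int) := by
          push_cast; ring
        rw [this, PySem.List.pyRange_one_eq_nil (le_refl _)]
        simp
      · intro i h1' h2'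
        omega
  | succ K ih =>
      intro hK
      obtain ⟨cur, he, hc⟩ := ih (by omega)
      have hcast1 : (((d - t.length : Nat) : Int) + ((K + 1 : Nat) : Int))
          = (((d - t.length : Nat) : Int) + ((K : Nat) : Int)) + 1 := by push_cast; ring
      rw [hcast1, PySem.List.pyRange_one_succ_right (by omega), List.foldl_append, he]
      simp only [List.foldl_cons, List.foldl_nil]
      have hiN : ((d - t.length : Nat) : Int) + ((K : Nat) : Int)
          = ((d - t.length + K : Nat) : Int) := by push_cast; ring
      rw [hiN]
      have hiNle : d - t.length + K ≤ min d s.length := by omega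
      -- the cell's value is the DP value
      have hv : (if ((d - t.length + K : Nat) : Int) = 0 then
              ((d : Int) - ((d - t.length + K : Nat) : Int)) * pvGap
            else if (d : Int) - ((d - t.length + K : Nat) : Int) = 0 then
              ((d - t.length + K : Nat) : Int) * pvGap
            else
              min (min (p1.getD (((d - t.length + K : Nat) : Int) - 1) 0 + pvGap)
                       (p1.getD ((d - t.length + K : Nat) : Int) 0 + pvGap))
                  (p2.getD (((d - t.length + K : Nat) : Int) - 1) 0 +
                    pvMM (PySem.List.pyGetD s (((d - t.length + K : Nat) : Int) - 1) ' ')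
                         (PySem.List.pyGetD t ((d : Int) - ((d - t.length + K : Nat) : Int) - 1) ' ')))
          = pvDP s t (d - t.length + K) (d - (d - t.length + K)) := by
        by_cases h0 : d - t.length + K = 0
        · rw [h0]
          rw [if_pos (by norm_num)]
          rw [pvDP_zero_left]
          have : (d : Int) - ((0 : Nat) : Int) = ((d - 0 : Nat) : Int) := by omega
          rw [this]
        · rw [if_neg (by exact_mod_cast h0)]
          by_cases hj0 : d - (d - t.length + K) = 0
          · rw [if_pos (by omega), hj0, pvDP_zero_right]
          · rw [if_neg (by omega)]
            obtain ⟨i', hi'⟩ : ∃ i', d - t.length + K = i' + 1 := ⟨d - t.length + K - 1, by omega⟩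
            obtain ⟨j', hj'⟩ : ∃ j', d - (d - t.length + K) = j' + 1 := ⟨d - (d - t.length + K) - 1, by omega⟩
            have e1 : (((d - t.length + K : Nat) : Int) - 1) = ((i' : Nat) : Int) := by omega
            have e2 : ((d : Int) - ((d - t.length + K : Nat) : Int) - 1) = ((j' : Nat) : Int) := by omega
            rw [e1, e2]
            rw [h1 i' (by omega) (by omega) (by omega), h1 (d - t.length + K) (by omega) (by omega) (by omega),
                h2 i' (by omega) (by omega) (by omega)]
            have e3 : d - 1 - i' = j' + 1 := by omega
            have e4 : d - 1 - (d - t.length + K) = j' := by omega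
            have e5 : d - 2 - i' = j' := by omega
            rw [e3, e4, e5, hi']
            have e6 : d - (i' + 1) = j' + 1 := by omega
            rw [e6]
            simp only [PySem.List.pyGetD_natCast]
            simp [pvDP]
      simp only [pvStepB]
      rw [hv]
      refine ⟨cur.insert ((d - t.length + K : Nat) : Int) (pvDP s t (d - t.length + K) (d - (d - t.length + K))), ?_, ?_⟩
      · -- the pair and the appended last-column cell
        refine congrArg (Prod.mk _) ?_
        by_cases hNd : t.length ≤ d
        · by_cases hK0 : K = 0
          · rw [if_pos (by omega), if_neg (by omega), if_pos ⟨hNd, by omega⟩]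
            have e6 : d - t.length + K = d - t.length := by omega
            have e7 : d - (d - t.length + K) = t.length := by omega
            rw [e7, e6]
            simp
          · rw [if_neg (by omega), if_pos ⟨hNd, by omega⟩, if_pos ⟨hNd, by omega⟩]
        · rw [if_neg (by omega), if_neg (by simp [hNd]), if_neg (by simp [hNd])]
      · intro i h1' h2'
        by_cases hii : i = d - t.length + K
        · rw [hii, PySem.Dict.getD_insert_self]
        · rw [PySem.Dict.getD_insert_of_ne _ _ _ (by exact_mod_cast hii)]
          exact hc i h1' (by omega)

-- B's outer loop: after D diagonals, last_col holds rows 0..D-1-N of the last column and the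
-- two dicts describe diagonals D-1 and D-2
lemma pvOuterB (s t : List Char) :
    ∀ D : Nat, D ≤ s.length + t.length + 1 →
    ∃ p2 p1 : PySem.Dict Int Int,
      (PySem.List.pyRange 0 (D : Int) 1).foldl
          (fun (st : List Int × PySem.Dict Int Int × PySem.Dict Int Int) (d : Int) =>
            let inner := (PySem.List.pyRange (max 0 (d - ((t.length : Int) + 1) + 1))
                (min d (((s.length : Int) + 1) - 1) + 1) 1).foldl
              (pvStepB s t ((t.length : Int) + 1) st.2.1 st.2.2 d) (PySem.Dict.empty, st.1)
            (inner.2, st.2.2, inner.1))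
          ([], PySem.Dict.empty, PySem.Dict.empty)
        = ((List.range (D - t.length)).map (fun i => pvDP s t i t.length), p2, p1)
      ∧ (∀ i : Nat, D - 1 - t.length ≤ i → i ≤ D - 1 → i ≤ s.length →
            p1.getD (i : Int) 0 = pvDP s t i (D - 1 - i))
      ∧ (∀ i : Nat, D - 2 - t.length ≤ i → i ≤ D - 2 → i ≤ s.length →
            p2.getD (i : Int) 0 = pvDP s t i (D - 2 - i)) := by
  intro D
  induction D with
  | zero =>
      intro _
      refine ⟨PySem.Dict.empty, PySem.Dict.empty, ?_, ?_, ?_⟩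
      · simp only [Nat.cast_zero]
        rw [PySem.List.pyRange_one_eq_nil (le_refl _)]
        simp
      · intro i h1' h2' h3'
        have hi0 : i = 0 := by omega
        rw [hi0]
        have : (0 : Nat) - 1 - (0 : Nat) = 0 := by omega
        simp [PySem.Dict.getD_empty, pvDP_zero_right]
      · intro i h1' h2' h3'
        have hi0 : i = 0 := by omega
        rw [hi0]
        simp [PySem.Dict.getD_empty, pvDP_zero_right]
  | succ D ih =>
      intro hD
      obtain ⟨p2, p1, hfold, hp1, hp2⟩ := ih (by omega)
      have hcast : ((D + 1 : Nat) : Int) = ((D : Nat) : Int) + 1 := by push_cast; ring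
      rw [hcast, PySem.List.pyRange_one_succ_right (by omega), List.foldl_append, hfold]
      simp only [List.foldl_cons, List.foldl_nil]
      -- normalise the bounds of the inner range
      have hlo : max 0 ((D : Int) - ((t.length : Int) + 1) + 1) = ((D - t.length : Nat) : Int) := by
        omega
      have hKf : D - t.length + (min D s.length + 1 - (D - t.length)) = min D s.length + 1 := by
        omega
      have hhi : min (D : Int) (((s.length : Int) + 1) - 1) + 1
          = ((D - t.length : Nat) : Int) + ((min D s.length + 1 - (D - t.length) : Nat) : Int) := by
        omega
      rw [hlo, hhi]
      obtain ⟨cur, he, hcur⟩ := pvInnerB s t D p2 p1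
        ((List.range (D - t.length)).map (fun i => pvDP s t i t.length)) hp1 hp2
        (min D s.length + 1 - (D - t.length)) (by omega)
      rw [he]
      refine ⟨p1, cur, ?_, ?_, ?_⟩
      · refine congrArg (fun L => (L, p1, cur)) ?_
        by_cases hNd : t.length ≤ D
        · rw [if_pos ⟨hNd, by omega⟩]
          have e1 : D + 1 - t.length = (D - t.length) + 1 := by omega
          rw [e1, List.range_succ, List.map_append]
          simp
        · rw [if_neg (by simp [hNd])]
          have e1 : D + 1 - t.length = 0 := by omega
          have e2 : D - t.length = 0 := by omega
          rw [e1, e2]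
          simp
      · intro i h1' h2' h3'
        have e1 : D + 1 - 1 - i = D - i := by omega
        rw [e1]
        exact hcur i (by omega) (by omega)
      · intro i h1' h2' h3'
        have e1 : D + 1 - 2 - i = D - 1 - i := by omega
        rw [e1]
        exact hp1 i (by omega) (by omega) h3'

-- ===== VERDICT (by name: the statement is the Claim_ definition above) =====
theorem eff_bottom_up_spec : Claim_equal_eff_bottom_up := by
  intro str_1 str_2 _ _
  unfold Spec_eff_bottom_up eff_bottom_up eff_bottom_up_alt
  simp only [Nat.add_sub_cancel]
  rw [pvOuterA str_1.toList str_2.toList str_2.toList.length (le_refl _)]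
  obtain ⟨p2, p1, hfold, -, -⟩ :=
    pvOuterB str_1.toList str_2.toList (str_1.toList.length + str_2.toList.length + 1) (le_refl _)
  have hcast : ((str_1.toList.length : Int) + 1) + ((str_2.toList.length : Int) + 1) - 1
      = ((str_1.toList.length + str_2.toList.length + 1 : Nat) : Int) := by push_cast; ring
  rw [hcast, hfold]
  have hlen : str_1.toList.length + str_2.toList.length + 1 - str_2.toList.length
      = str_1.toList.length + 1 := by omega
  rw [hlen]
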